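-- pv_equiv track=rewrite | github.com/1998factorial/Codeforces | contests/contest704Div2/zhu.py | solve
-- ===== SOURCE A (Python) =====
-- def solve(a , b , i , j , n , m):
--     if i == n and j == m:
--         return [""]
--     if i == n and j < m:
--         ret = solve(a , b , i , j + 1 , n , m)
--         ret2 = []
--         for s in ret:
--             ret2.append(b[j] + s)
--         return ret2
--     if i < n and j == m:
--         ret = solve(a , b , i + 1 , j , n , m)
--         ret2 = []
--         for s in ret:
--             ret2.append(a[i] + s)
--         return ret2
--     reta = solve(a , b , i + 1 , j , n , m)
--     retb = solve(a , b , i , j + 1 , n , m)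
--     ret = []
--     for s in reta:
--         ret.append(a[i] + s)
--     for s in retb:
--         ret.append(b[j] + s)
--     return ret
-- ===== SOURCE B (Python) =====
-- def solve(a, b, i, j, n, m):
--     # Row-by-row dynamic programming: compute each subproblem (p, q) exactly once,
--     # keeping only one row of results at a time, instead of A's branching recursion.
--     def bottom_row(q):
--         # [dp[n][q], dp[n][q+1], ..., dp[n][m]]
--         if q == m:
--             return [[""]]
--         rest = bottom_row(q + 1)
--         return [[b[q] + s for s in rest[0]]] + rest
--
--     def step_row(p, q, row):
--         # row = [dp[p+1][q], ..., dp[p+1][m]]  ->  [dp[p][q], ..., dp[p][m]]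
--         head, *rest = row
--         if not rest:
--             return [[a[p] + s for s in head]]
--         tail = step_row(p, q + 1, rest)
--         return [[a[p] + s for s in head] + [b[q] + s for s in tail[0]]] + tail
--
--     def rows(p):
--         if p == n:
--             return bottom_row(j)
--         return step_row(p, j, rows(p + 1))
--
--     return rows(i)[0]
-- ===== Notes on version B (the rewrite author's own statement) =====
-- stated objective: alternative
-- what changed: Replaced A's binary-branching recursion, which rebuilds each overlapping subproblem (i,j) many times, by a bottom-up row-by-row dynamic programming pass that computes every subproblem exactly once, keeping a single row of results at a time.
import Mathlib
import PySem

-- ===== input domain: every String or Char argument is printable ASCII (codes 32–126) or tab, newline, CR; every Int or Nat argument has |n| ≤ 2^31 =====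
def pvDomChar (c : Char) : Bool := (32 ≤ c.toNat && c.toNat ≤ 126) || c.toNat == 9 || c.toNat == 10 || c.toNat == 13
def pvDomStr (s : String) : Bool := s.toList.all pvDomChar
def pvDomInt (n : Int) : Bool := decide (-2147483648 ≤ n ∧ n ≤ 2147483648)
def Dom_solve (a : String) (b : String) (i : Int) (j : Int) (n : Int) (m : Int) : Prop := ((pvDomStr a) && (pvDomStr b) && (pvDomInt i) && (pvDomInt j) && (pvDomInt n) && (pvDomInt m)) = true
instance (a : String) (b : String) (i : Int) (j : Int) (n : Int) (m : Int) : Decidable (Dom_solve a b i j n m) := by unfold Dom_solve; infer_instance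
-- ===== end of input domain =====

-- B replaces A's branching recursion by a bottom-up row DP that computes each subproblem exactly once.


-- ===== PORT A =====
-- shared primitive: Python's `t[k] + s` (string indexing, possibly negative, then concat);
-- exact where the index is in range (Pre_ guarantees that), default s on IndexError
def pyIdxCat (t : String) (k : Int) (s : String) : String :=
  match PySem.Str.pyGet? t k with
  | some c => String.ofList (c :: s.toList)
  | none => s

-- literal port of A's recursion; fuel makes the (possibly diverging) Python recursion total,
-- Pre_ guarantees the initial fuel suffices
def solveF : Nat → String → String → Int → Int → Int → Int → List String
  | 0, _, _, _, _, _, _ => []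
  | f+1, a, b, i, j, n, m =>
    if i = n ∧ j = m then [""]
    else if i = n ∧ j < m then
      (solveF f a b i (j+1) n m).map (pyIdxCat b j)
    else if i < n ∧ j = m then
      (solveF f a b (i+1) j n m).map (pyIdxCat a i)
    else
      (solveF f a b (i+1) j n m).map (pyIdxCat a i) ++ (solveF f a b i (j+1) n m).map (pyIdxCat b j)

def solve (a : String) (b : String) (i : Int) (j : Int) (n : Int) (m : Int) : List String :=
  solveF ((n - i + (m - j)).toNat + 1) a b i j n m

-- ===== PORT B =====
-- bottom_row of Source B: [dp[n][q], ..., dp[n][m]]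
def bottomRowF : Nat → String → Int → Int → List (List String)
  | 0, _, _, _ => []
  | f+1, b, q, m =>
    if q = m then [[""]]
    else
      let rest := bottomRowF f b (q+1) m
      ((rest.headD []).map (pyIdxCat b q)) :: rest

-- step_row of Source B: one row of the DP from the row below (structural recursion on the row)
def stepRow (a : String) (b : String) (p : Int) : Int → List (List String) → List (List String)
  | _, [] => []   -- unreachable under Pre_ (Python would raise on unpacking)
  | _, [r] => [r.map (pyIdxCat a p)]
  | q, r :: rest =>
      let tail := stepRow a b p (q+1) rest
      (r.map (pyIdxCat a p) ++ (tail.headD []).map (pyIdxCat b q)) :: tail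

-- rows of Source B
def rowsF : Nat → String → String → Int → Int → Int → Int → List (List String)
  | 0, _, _, _, _, _, _ => []
  | f+1, a, b, p, j, n, m =>
    if p = n then bottomRowF ((m - j).toNat + 1) b j m
    else stepRow a b p j (rowsF f a b (p+1) j n m)

def solve_alt (a : String) (b : String) (i : Int) (j : Int) (n : Int) (m : Int) : List String :=
  (rowsF ((n - i).toNat + 1) a b i j n m).headD []

-- ===== PRECONDITION & SPEC =====
-- Exactly where Python A returns normally: i ≤ n and j ≤ m (otherwise the recursion never
-- reaches a base case, RecursionError) and every character position the recursion touches
-- (a[p] for p in [i,n) when i < n, b[q] for q in [j,m) when j < m, Python negative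
-- indexing included) is in range (otherwise IndexError).
def Pre_solve (a : String) (b : String) (i : Int) (j : Int) (n : Int) (m : Int) : Prop :=
  i ≤ n ∧ j ≤ m ∧
  (i < n → -(a.toList.length : Int) ≤ i ∧ n ≤ (a.toList.length : Int)) ∧
  (j < m → -(b.toList.length : Int) ≤ j ∧ m ≤ (b.toList.length : Int))
instance (a : String) (b : String) (i : Int) (j : Int) (n : Int) (m : Int) : Decidable (Pre_solve a b i j n m) := by unfold Pre_solve; infer_instance

def pvWitness_solve : String × String × Int × Int × Int × Int := ("ab", "c", 0, 0, 2, 1)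

def Spec_solve (a : String) (b : String) (i : Int) (j : Int) (n : Int) (m : Int) (out : List String) : Prop := out = solve_alt a b i j n m
instance (a : String) (b : String) (i : Int) (j : Int) (n : Int) (m : Int) (out : List String) : Decidable (Spec_solve a b i j n m out) := by unfold Spec_solve; infer_instance

-- ===== CLAIM (what is proved, stated in full; the proofs are below) =====
def Claim_equal_solve : Prop := ∀ (a : String) (b : String) (i : Int) (j : Int) (n : Int) (m : Int), Dom_solve a b i j n m → Pre_solve a b i j n m → Spec_solve a b i j n m (solve a b i j n m)

-- ===== LEMMAS AND PROOFS =====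

-- one-step unfolding of the fueled recursions (definitional)
theorem solveF_succ (f : Nat) (a b : String) (i j n m : Int) :
    solveF (f+1) a b i j n m =
      (if i = n ∧ j = m then [""]
       else if i = n ∧ j < m then (solveF f a b i (j+1) n m).map (pyIdxCat b j)
       else if i < n ∧ j = m then (solveF f a b (i+1) j n m).map (pyIdxCat a i)
       else (solveF f a b (i+1) j n m).map (pyIdxCat a i) ++ (solveF f a b i (j+1) n m).map (pyIdxCat b j)) := rfl

theorem bottomRowF_succ (f : Nat) (b : String) (q m : Int) :
    bottomRowF (f+1) b q m =
      (if q = m then [[""]]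
       else ((bottomRowF f b (q+1) m).headD []).map (pyIdxCat b q) :: bottomRowF f b (q+1) m) := rfl

theorem stepRow_single (a b : String) (p q : Int) (r : List String) :
    stepRow a b p q [r] = [r.map (pyIdxCat a p)] := rfl

theorem stepRow_cons₂ (a b : String) (p q : Int) (r r2 : List String) (rest : List (List String)) :
    stepRow a b p q (r :: r2 :: rest) =
      (r.map (pyIdxCat a p) ++ ((stepRow a b p (q+1) (r2 :: rest)).headD []).map (pyIdxCat b q))
        :: stepRow a b p (q+1) (r2 :: rest) := rfl

theorem rowsF_succ (f : Nat) (a b : String) (p j n m : Int) :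
    rowsF (f+1) a b p j n m =
      (if p = n then bottomRowF ((m - j).toNat + 1) b j m
       else stepRow a b p j (rowsF f a b (p+1) j n m)) := rfl

-- fuel irrelevance for A's recursion, given enough fuel
theorem solveF_mono (a b : String) (n m : Int) :
    ∀ f1 : Nat, ∀ f2 : Nat, ∀ i j : Int, i ≤ n → j ≤ m →
      (n - i + (m - j)).toNat < f1 → (n - i + (m - j)).toNat < f2 →
      solveF f1 a b i j n m = solveF f2 a b i j n m := by
  intro f1
  induction f1 with
  | zero => intro f2 i j hi hj h1 h2; omega
  | succ f ih =>
    intro f2 i j hi hj h1 h2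
    match f2 with
    | 0 => omega
    | g+1 =>
      rw [solveF_succ, solveF_succ]
      split_ifs with h₁ h₂ h₃
      · rfl
      · obtain ⟨hE, hL⟩ := h₂
        rw [ih g i (j+1) hi (by omega) (by omega) (by omega)]
      · obtain ⟨hL, hE⟩ := h₃
        rw [ih g (i+1) j (by omega) hj (by omega) (by omega)]
      · have hin : i < n := by
          rcases lt_or_eq_of_le hi with h | h
          · exact h
          · exfalso
            rcases lt_or_eq_of_le hj with h2 | h2
            · exact h₂ ⟨h, h2⟩
            · exact h₁ ⟨h, h2⟩
        have hjm : j < m := by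
          rcases lt_or_eq_of_le hj with h2 | h2
          · exact h2
          · exact absurd ⟨hin, h2⟩ h₃
        rw [ih g (i+1) j (by omega) hj (by omega) (by omega),
            ih g i (j+1) hi (by omega) (by omega) (by omega)]

-- A's recurrence at canonical fuel
theorem solve_base (a b : String) (n m : Int) : solve a b n m n m = [""] := by
  unfold solve
  rw [solveF_succ, if_pos ⟨rfl, rfl⟩]

theorem solve_top (a b : String) (q n m : Int) (hq : q < m) :
    solve a b n q n m = (solve a b n (q+1) n m).map (pyIdxCat b q) := by
  unfold solve
  rw [solveF_succ, if_neg (by intro h; omega), if_pos ⟨rfl, hq⟩,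
      solveF_mono a b n m ((n - n + (m - q)).toNat) ((n - n + (m - (q+1))).toNat + 1) n (q+1)
        le_rfl (by omega) (by omega) (by omega)]

theorem solve_left (a b : String) (p n m : Int) (hp : p < n) :
    solve a b p m n m = (solve a b (p+1) m n m).map (pyIdxCat a p) := by
  unfold solve
  rw [solveF_succ, if_neg (by intro h; omega), if_neg (by intro h; omega), if_pos ⟨hp, rfl⟩,
      solveF_mono a b n m ((n - p + (m - m)).toNat) ((n - (p+1) + (m - m)).toNat + 1) (p+1) m
        (by omega) le_rfl (by omega) (by omega)]

theorem solve_mid (a b : String) (i j n m : Int) (hi : i < n) (hj : j < m) :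
    solve a b i j n m =
      (solve a b (i+1) j n m).map (pyIdxCat a i) ++ (solve a b i (j+1) n m).map (pyIdxCat b j) := by
  unfold solve
  rw [solveF_succ, if_neg (by intro h; omega), if_neg (by intro h; omega),
      if_neg (by intro h; omega),
      solveF_mono a b n m ((n - i + (m - j)).toNat) ((n - (i+1) + (m - j)).toNat + 1) (i+1) j
        (by omega) (by omega) (by omega) (by omega),
      solveF_mono a b n m ((n - i + (m - j)).toNat) ((n - i + (m - (j+1))).toNat + 1) i (j+1)
        (by omega) (by omega) (by omega) (by omega)]

-- the row of A-values [solve p q, solve p (q+1), ..., solve p m]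
def rowSpec (a b : String) (n m p q : Int) : List (List String) :=
  (List.range ((m - q).toNat + 1)).map (fun k : Nat => solve a b p (q + (k : Int)) n m)

theorem rowSpec_cons (a b : String) (n m p q : Int) (hq : q < m) :
    rowSpec a b n m p q = solve a b p q n m :: rowSpec a b n m p (q+1) := by
  unfold rowSpec
  rw [show (m - q).toNat + 1 = ((m - (q+1)).toNat + 1) + 1 by omega]
  conv_lhs => rw [List.range_succ_eq_map]
  rw [List.map_cons, List.map_map, Int.natCast_zero, add_zero]
  congr 1
  apply List.map_congr_left
  intro k _
  simp only [Function.comp_apply]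
  congr 1
  push_cast
  ring

theorem rowSpec_last (a b : String) (n m p : Int) :
    rowSpec a b n m p m = [solve a b p m n m] := by
  unfold rowSpec
  rw [show (m - m).toNat + 1 = 1 by omega]
  simp

theorem rowSpec_head (a b : String) (n m p q : Int) :
    (rowSpec a b n m p q).headD [] = solve a b p q n m := by
  unfold rowSpec
  rw [List.range_succ_eq_map]
  simp

-- expose the head of a row without changing its description
theorem rowSpec_head_cons (a b : String) (n m p q : Int) :
    rowSpec a b n m p q = solve a b p q n m :: (rowSpec a b n m p q).tail := by
  unfold rowSpec
  rw [List.range_succ_eq_map]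
  simp

-- bottom_row computes row n of the DP
theorem bottomRow_eq (a b : String) (n m : Int) :
    ∀ f : Nat, ∀ q : Int, q ≤ m → (m - q).toNat < f →
      bottomRowF f b q m = rowSpec a b n m n q := by
  intro f
  induction f with
  | zero => intro q hq h; omega
  | succ f ih =>
    intro q hq h
    by_cases hqm : q = m
    · rw [hqm, bottomRowF_succ, if_pos rfl, rowSpec_last, solve_base]
    · have hq' : q < m := by omega
      rw [bottomRowF_succ, if_neg hqm, ih (q+1) (by omega) (by omega), rowSpec_head,
          ← solve_top a b q n m hq', rowSpec_cons a b n m n q hq']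

-- step_row turns row p+1 of the DP into row p
theorem stepRow_eq (a b : String) (n m p : Int) (hp : p < n) :
    ∀ f : Nat, ∀ q : Int, q ≤ m → (m - q).toNat < f →
      stepRow a b p q (rowSpec a b n m (p+1) q) = rowSpec a b n m p q := by
  intro f
  induction f with
  | zero => intro q hq h; omega
  | succ f ih =>
    intro q hq h
    by_cases hqm : q = m
    · rw [hqm, rowSpec_last, stepRow_single, ← solve_left a b p n m hp, rowSpec_last]
    · have hq' : q < m := by omega
      rw [rowSpec_cons a b n m (p+1) q hq', rowSpec_head_cons a b n m (p+1) (q+1),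
          stepRow_cons₂, ← rowSpec_head_cons a b n m (p+1) (q+1),
          ih (q+1) (by omega) (by omega), rowSpec_head,
          ← solve_mid a b p q n m hp hq', rowSpec_cons a b n m p q hq']

-- rows computes row p of the DP
theorem rows_eq (a b : String) (j n m : Int) (hj : j ≤ m) :
    ∀ f : Nat, ∀ p : Int, p ≤ n → (n - p).toNat < f →
      rowsF f a b p j n m = rowSpec a b n m p j := by
  intro f
  induction f with
  | zero => intro p hp h; omega
  | succ f ih =>
    intro p hp h
    by_cases hpn : p = n
    · rw [hpn, rowsF_succ, if_pos rfl]
      exact bottomRow_eq a b n m ((m - j).toNat + 1) j hj (by omega)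
    · have hp' : p < n := by omega
      rw [rowsF_succ, if_neg hpn, ih (p+1) (by omega) (by omega)]
      exact stepRow_eq a b n m p hp' ((m - j).toNat + 1) j hj (by omega)

-- ===== VERDICT (by name: the statement is the Claim_ definition above) =====
theorem solve_spec : Claim_equal_solve := by
  intro a b i j n m _hdom hpre
  obtain ⟨hi, hj, _, _⟩ := hpre
  unfold Spec_solve solve_alt
  rw [rows_eq a b j n m hj ((n - i).toNat + 1) i hi (by omega), rowSpec_head]
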